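-- pv_equiv track=rewrite | github.com/sztrok/KODOWANIE-I-KOMPRESJA-DANYCH | Lista 4/test.py | diff_encoding
-- ===== SOURCE A (Python) =====
-- def diff_encoding_color(pixels, bits):
--     prev = 0
--     max_value = 2 ** bits
--     min_value = -2 ** bits
--     diffs = []
--     M = list(range(min_value, max_value + 1))
--     for item in pixels:
--         temp = item - prev
--         current = min(M, key=lambda x: abs(x - temp))
--         diffs.append(current)
--         prev = sum(diffs)
--
--     return diffs
--
-- def diff_encoding(pixels, bits):
--     result = []
--     result_blue = []
--     result_green = []
--     result_red = []
--     for item in pixels: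
--         result_blue.append(item[0])
--         result_green.append(item[1])
--         result_red.append(item[2])
--     result_blue = diff_encoding_color(result_blue, bits)
--     result_green = diff_encoding_color(result_green, bits)
--     result_red = diff_encoding_color(result_red, bits)
--
--     for i in range(len(result_blue)):
--         result.append((result_blue[i], result_green[i], result_red[i]))
--     return result
-- ===== SOURCE B (Python) =====
-- def diff_encoding(pixels, bits):
--     # Clamp each channel difference with min/max instead of scanning a materialized
--     # 2^(bits+1)-element range, and keep running per-channel sums instead of
--     # re-summing the diff list each step.
--     hi = 1 << bits
--     lo = -hi
--     out = []
--     pb = pg = pr = 0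
--     for b, g, r in pixels:
--         db = min(max(b - pb, lo), hi)
--         dg = min(max(g - pg, lo), hi)
--         dr = min(max(r - pr, lo), hi)
--         out.append((db, dg, dr))
--         pb += db
--         pg += dg
--         pr += dr
--     return out
-- ===== Notes on version B (the rewrite author's own statement) =====
-- stated objective: simpler
-- what changed: B clamps each difference to [-2^bits, 2^bits] with min/max instead of scanning a materialized list(range(-2^bits, 2^bits+1)) per pixel, and keeps running per-channel sums instead of re-summing the whole diff list every iteration, in a single pass over the pixel triples instead of three per-channel passes. Pre_ excludes only raising inputs: bits < 0 (A: TypeError, B: ValueError) and bits >= 62 (A: OverflowError, the materialized range exceeds sys.maxsize elements).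
import Mathlib
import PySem

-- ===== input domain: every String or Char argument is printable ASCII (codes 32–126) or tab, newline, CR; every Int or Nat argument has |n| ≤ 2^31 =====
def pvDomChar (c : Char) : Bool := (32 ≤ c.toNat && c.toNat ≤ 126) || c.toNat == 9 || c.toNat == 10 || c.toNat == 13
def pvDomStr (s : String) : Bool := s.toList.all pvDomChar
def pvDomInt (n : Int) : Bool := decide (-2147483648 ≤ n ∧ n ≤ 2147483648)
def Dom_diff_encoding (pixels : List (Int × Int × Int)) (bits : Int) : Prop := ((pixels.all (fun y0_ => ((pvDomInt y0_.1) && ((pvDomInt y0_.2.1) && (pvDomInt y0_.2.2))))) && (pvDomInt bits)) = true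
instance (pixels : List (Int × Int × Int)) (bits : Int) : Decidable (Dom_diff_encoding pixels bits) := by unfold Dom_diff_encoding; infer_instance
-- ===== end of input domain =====

-- B replaces A's per-pixel scan of the materialized list(range(-2^bits, 2^bits+1)) by a
-- direct min/max clamp, and A's per-step re-summation of the diff list by running
-- per-channel sums, in one pass over the triples (simpler).

-- ===== PORT A =====
-- Python: one channel. prev=0; M=list(range(-2**bits, 2**bits+1)); per item: temp=item-prev,
-- current=min(M, key=lambda x: abs(x-temp)), append, prev=sum(diffs).
-- '2 ** bits' is ported as 2 ^ bits.toNat: for bits < 0 the Python raises TypeError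
-- (range on a float), which Pre_ excludes. min on the (always nonempty) M via PySem.List.min?
-- (first extremal, = Python's min with key); the .getD 0 arm is unreachable since M ≠ [].
def diff_encoding_color (pixels : List Int) (bits : Int) : List Int :=
  let max_value : Int := 2 ^ bits.toNat
  let min_value : Int := -(2 ^ bits.toNat)
  let M := PySem.List.pyRange min_value (max_value + 1) 1
  (pixels.foldl (fun (s : Int × List Int) item =>
      let temp := item - s.1
      let current := (PySem.List.min? M (fun x => |x - temp|)).getD 0
      let diffs := s.2 ++ [current]
      (diffs.sum, diffs)) (0, [])).2

def diff_encoding (pixels : List (Int × Int × Int)) (bits : Int) : List (Int × Int × Int) :=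
  -- first loop: split channels (one loop, three accumulating lists)
  let chans := pixels.foldl (fun (acc : List Int × List Int × List Int) item =>
      (acc.1 ++ [item.1], acc.2.1 ++ [item.2.1], acc.2.2 ++ [item.2.2])) ([], [], [])
  let result_blue := diff_encoding_color chans.1 bits
  let result_green := diff_encoding_color chans.2.1 bits
  let result_red := diff_encoding_color chans.2.2 bits
  -- second loop: for i in range(len(result_blue)): append the triple of the i-th diffs.
  -- The three lists have equal length, so result_green[i]/result_red[i] never raise;
  -- pyGetD's default 0 is unreachable.
  (PySem.List.pyRange 0 (result_blue.length : Int) 1).foldl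
    (fun acc i => acc ++ [(PySem.List.pyGetD result_blue i 0,
                           PySem.List.pyGetD result_green i 0,
                           PySem.List.pyGetD result_red i 0)]) []

-- ===== PORT B =====
-- Python B: hi = 1 << bits (raises for bits < 0, outside Pre_; ported as 2 ^ bits.toNat),
-- one pass over the pixel triples keeping (pb, pg, pr) running sums and clamping with min/max.
def diff_encoding_alt (pixels : List (Int × Int × Int)) (bits : Int) : List (Int × Int × Int) :=
  let hi : Int := 2 ^ bits.toNat
  let lo : Int := -hi
  (pixels.foldl (fun (s : (Int × Int × Int) × List (Int × Int × Int)) p =>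
      let db := min (max (p.1 - s.1.1) lo) hi
      let dg := min (max (p.2.1 - s.1.2.1) lo) hi
      let dr := min (max (p.2.2 - s.1.2.2) lo) hi
      ((s.1.1 + db, s.1.2.1 + dg, s.1.2.2 + dr), s.2 ++ [(db, dg, dr)]))
    ((0, 0, 0), [])).2

-- ===== PRECONDITION & SPEC =====
-- Python A raises on bits < 0 (TypeError: 2**bits is a float, range() rejects it; B's
-- 1 << bits raises ValueError there too) and on bits >= 62 (OverflowError: the range has
-- 2^(bits+1)+1 > sys.maxsize elements, list() cannot materialize it). Only raising inputs
-- are excluded.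
def Pre_diff_encoding (pixels : List (Int × Int × Int)) (bits : Int) : Prop := 0 ≤ bits ∧ bits ≤ 61
instance (pixels : List (Int × Int × Int)) (bits : Int) : Decidable (Pre_diff_encoding pixels bits) := by unfold Pre_diff_encoding; infer_instance
def pvWitness_diff_encoding : (List (Int × Int × Int)) × Int := ([(5, 300, -7), (0, 0, 0), (10, 10, 10)], 3)
def Spec_diff_encoding (pixels : List (Int × Int × Int)) (bits : Int) (out : List (Int × Int × Int)) : Prop := out = diff_encoding_alt pixels bits
instance (pixels : List (Int × Int × Int)) (bits : Int) (out : List (Int × Int × Int)) : Decidable (Spec_diff_encoding pixels bits out) := by unfold Spec_diff_encoding; infer_instance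

-- ===== CLAIM (what is proved, stated in full; the proofs are below) =====
def Claim_equal_diff_encoding : Prop := ∀ (pixels : List (Int × Int × Int)) (bits : Int), Dom_diff_encoding pixels bits → Pre_diff_encoding pixels bits → Spec_diff_encoding pixels bits (diff_encoding pixels bits)

-- ===== LEMMAS AND PROOFS =====

-- the common reference: clamp one difference
def pvClamp (lo hi t : Int) : Int := min (max t lo) hi

-- per-channel reference scan
def pvScan (lo hi prev : Int) : List Int → List Int
  | [] => []
  | x :: xs => let d := pvClamp lo hi (x - prev)
               d :: pvScan lo hi (prev + d) xs

-- min?'s foldl keeps an accumulator whose key nothing beats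
theorem pv_foldl_min_keep {α : Type} (key : α → Int) (l : List α) (b : α)
    (h : ∀ y ∈ l, ¬ key y < key b) :
    l.foldl (fun acc x => match acc with
      | none => some x
      | some cur => if key x < key cur then some x else some cur) (some b) = some b := by
  induction l with
  | nil => rfl
  | cons x t ih =>
    simp only [List.foldl_cons]
    rw [if_neg (h x (by simp))]
    exact ih (fun y hy => h y (by simp [hy]))

-- once the unique strict minimum is reachable, the fold returns it
theorem pv_foldl_min_strict {α : Type} (key : α → Int) (l : List α) (m b : α)
    (hmb : key m < key b) (hm : m ∈ l) (h : ∀ y ∈ l, y ≠ m → key m < key y) :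
    l.foldl (fun acc x => match acc with
      | none => some x
      | some cur => if key x < key cur then some x else some cur) (some b) = some m := by
  induction l generalizing b with
  | nil => cases hm
  | cons x t ih =>
    simp only [List.foldl_cons]
    by_cases hx : x = m
    · rw [hx, if_pos hmb]
      exact pv_foldl_min_keep key t m (fun y hy => by
        by_cases hym : y = m
        · subst hym; omega
        · have := h y (by simp [hy]) hym; omega)
    · have hmx : key m < key x := h x (by simp) hx
      have hm' : m ∈ t := by
        rcases List.mem_cons.mp hm with h1 | h1
        · exact absurd h1.symm hx
        · exact h1
      have h' : ∀ y ∈ t, y ≠ m → key m < key y := fun y hy => h y (by simp [hy])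
      split_ifs with hc
      · exact ih x hmx hm' h'
      · exact ih b hmb hm' h'

-- min over the materialized range with key |x - t| IS the clamp
theorem pv_min_range_eq_clamp (lo hi t : Int) (hlohi : lo ≤ hi) :
    PySem.List.min? (PySem.List.pyRange lo (hi + 1) 1) (fun x => |x - t|) = some (pvClamp lo hi t) := by
  have hcons : PySem.List.pyRange lo (hi + 1) 1 = lo :: PySem.List.pyRange (lo + 1) (hi + 1) 1 :=
    PySem.List.pyRange_one_cons (by omega)
  have hmemc : ∀ y ∈ PySem.List.pyRange lo (hi + 1) 1, lo ≤ y ∧ y < hi + 1 := by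
    intro y hy; exact (PySem.List.mem_pyRange_one.mp hy)
  have hstrict : ∀ y ∈ PySem.List.pyRange lo (hi + 1) 1, y ≠ pvClamp lo hi t →
      |pvClamp lo hi t - t| < |y - t| := by
    intro y hy hne
    have hb := hmemc y hy
    simp only [pvClamp] at hne ⊢
    rcases abs_cases (min (max t lo) hi - t) with ⟨h1, h2⟩ | ⟨h1, h2⟩ <;>
      rcases abs_cases (y - t) with ⟨h3, h4⟩ | ⟨h3, h4⟩ <;> rw [h1, h3] <;> omega
  unfold PySem.List.min?
  rw [hcons]
  simp only [List.foldl_cons]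
  by_cases hlom : lo = pvClamp lo hi t
  · rw [← hlom]
    exact pv_foldl_min_keep _ _ _ (fun y hy => by
      by_cases hym : y = pvClamp lo hi t
      · rw [hym, ← hlom]; omega
      · have := hstrict y (by rw [hcons]; simp [hy]) hym
        rw [← hlom] at this; omega)
  · have hmem : pvClamp lo hi t ∈ PySem.List.pyRange (lo + 1) (hi + 1) 1 := by
      rw [PySem.List.mem_pyRange_one]
      have : lo ≤ pvClamp lo hi t ∧ pvClamp lo hi t ≤ hi := by
        simp only [pvClamp]; omega
      constructor
      · rcases lt_or_eq_of_le this.1 with h | h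
        · omega
        · exact absurd h hlom
      · omega
    exact pv_foldl_min_strict _ _ _ _
      (hstrict lo (by rw [hcons]; simp) (fun h => hlom h))
      hmem
      (fun y hy => hstrict y (by rw [hcons]; simp [hy]))

-- A's per-channel loop, with its re-summed prev, is the reference scan
theorem pv_color_loop (lo hi : Int) (hlohi : lo ≤ hi) (xs : List Int) (ds : List Int) :
    (xs.foldl (fun (s : Int × List Int) item =>
      let temp := item - s.1
      let current := (PySem.List.min? (PySem.List.pyRange lo (hi + 1) 1)
        (fun x => |x - temp|)).getD 0
      let diffs := s.2 ++ [current]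
      (diffs.sum, diffs)) (ds.sum, ds)).2 = ds ++ pvScan lo hi ds.sum xs := by
  induction xs generalizing ds with
  | nil => simp [pvScan]
  | cons x t ih =>
    have hmin := pv_min_range_eq_clamp lo hi (x - ds.sum) hlohi
    simp only [List.foldl_cons, hmin, Option.getD_some]
    rw [ih (ds ++ [pvClamp lo hi (x - ds.sum)])]
    simp [pvScan, List.sum_append]

theorem pv_color_eq_scan (xs : List Int) (bits : Int) :
    diff_encoding_color xs bits = pvScan (-(2 ^ bits.toNat)) (2 ^ bits.toNat) 0 xs := by
  have h2 : (0 : Int) < 2 ^ bits.toNat := by positivity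
  have := pv_color_loop (-(2 ^ bits.toNat)) (2 ^ bits.toNat) (by omega) xs []
  simpa [diff_encoding_color] using this

-- A's channel-splitting loop
theorem pv_split_loop (pixels : List (Int × Int × Int)) (a b c : List Int) :
    pixels.foldl (fun (acc : List Int × List Int × List Int) item =>
      (acc.1 ++ [item.1], acc.2.1 ++ [item.2.1], acc.2.2 ++ [item.2.2])) (a, b, c)
    = (a ++ pixels.map (·.1), b ++ pixels.map (·.2.1), c ++ pixels.map (·.2.2)) := by
  induction pixels generalizing a b c with
  | nil => simp
  | cons p t ih => simp [ih]

-- B's loop, with prevs generalized, zips the three reference scans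
theorem pv_alt_loop (lo hi : Int) (pixels : List (Int × Int × Int))
    (pb pg pr : Int) (acc : List (Int × Int × Int)) :
    (pixels.foldl (fun (s : (Int × Int × Int) × List (Int × Int × Int)) p =>
      let db := min (max (p.1 - s.1.1) lo) hi
      let dg := min (max (p.2.1 - s.1.2.1) lo) hi
      let dr := min (max (p.2.2 - s.1.2.2) lo) hi
      ((s.1.1 + db, s.1.2.1 + dg, s.1.2.2 + dr), s.2 ++ [(db, dg, dr)]))
      ((pb, pg, pr), acc)).2
    = acc ++ (pvScan lo hi pb (pixels.map (·.1))).zip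
        ((pvScan lo hi pg (pixels.map (·.2.1))).zip (pvScan lo hi pr (pixels.map (·.2.2)))) := by
  induction pixels generalizing pb pg pr acc with
  | nil => simp [pvScan]
  | cons p t ih =>
    simp only [List.foldl_cons, List.map_cons, pvScan]
    rw [ih]
    simp [pvClamp]

theorem pv_scan_length (lo hi prev : Int) (xs : List Int) :
    (pvScan lo hi prev xs).length = xs.length := by
  induction xs generalizing prev with
  | nil => rfl
  | cons x t ih => simp [pvScan, ih]

theorem pv_zip_loop (ra rg rr : List Int) (hg : rg.length = ra.length) (hr : rr.length = ra.length) :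
    (PySem.List.pyRange 0 (ra.length : Int) 1).foldl
      (fun acc i => acc ++ [(PySem.List.pyGetD ra i 0, PySem.List.pyGetD rg i 0,
                             PySem.List.pyGetD rr i 0)]) []
    = ra.zip (rg.zip rr) := by
  rw [PySem.List.foldl_append_singleton_eq_map, PySem.List.pyRange_one]
  simp only [List.map_map, List.nil_append]
  apply List.ext_getElem
  · simp [hg, hr]
  · intro i h1 h2
    have hi : i < ra.length := by simpa using h1
    have hig : i < rg.length := by omega
    have hir : i < rr.length := by omega
    simp only [List.getElem_map, List.getElem_range, Function.comp_apply]
    have hz : ((0 : Int) + (i : Int)) = ((i : Nat) : Int) := by ring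
    rw [hz, PySem.List.pyGetD_natCast, PySem.List.pyGetD_natCast, PySem.List.pyGetD_natCast]
    simp [List.getD_eq_getElem?_getD, hi, hig, hir]

-- ===== VERDICT (by name: the statement is the Claim_ definition above) =====
theorem diff_encoding_spec : Claim_equal_diff_encoding := by
  intro pixels bits _ _
  unfold Spec_diff_encoding diff_encoding diff_encoding_alt
  simp only [pv_split_loop, List.nil_append, pv_color_eq_scan]
  rw [pv_zip_loop _ _ _ (by simp [pv_scan_length]) (by simp [pv_scan_length])]
  have := pv_alt_loop (-(2 ^ bits.toNat)) (2 ^ bits.toNat) pixels 0 0 0 []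
  simp only [List.nil_append] at this
  exact this.symm
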